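-- pv_equiv track=rewrite | github.com/GyuyeongKim/OrbitCache-public | orbitcache/controller.py | tostring_key
-- ===== SOURCE A (Python) =====
-- KEY_SIZE = 16  # Unit: Byte. OrbitCache, original key
--
-- CHARSET = "ABCDEFGHIJKLMNOPQRSTUVWXYZabcdefghijklmnopqrstuvwxyz0123456789"
--
-- CHARSET_SIZE = len(CHARSET)
--
-- def complex_transform(number):
--
--     transformed = number
--     for _ in range(5):
--         transformed = ((transformed << 3) - transformed + 7) & 0xFFFFFFFFFFFFFFFF
--     return transformed
--
-- def tostring_key(number):
--     key_chars = [''] * (KEY_SIZE - 1)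
--     transformed_number = complex_transform(number)
--
--     for i in range(KEY_SIZE - 2, -1, -1):
--         index = transformed_number % CHARSET_SIZE
--         key_chars[i] = CHARSET[index]
--         transformed_number //= CHARSET_SIZE
--
--     return ''.join(key_chars)
-- ===== SOURCE B (Python) =====
-- KEY_SIZE = 16  # Unit: Byte. OrbitCache, original key
--
-- CHARSET = "ABCDEFGHIJKLMNOPQRSTUVWXYZabcdefghijklmnopqrstuvwxyz0123456789"
--
-- CHARSET_SIZE = len(CHARSET)
--
-- def tostring_key(number):
--     # Closed form of complex_transform: one step is x -> 7*x + 7 (mod 2**64),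
--     # so five steps give x -> 16807*x + 19607 (mod 2**64).
--     t = (16807 * number + 19607) % 0x10000000000000000
--     digits = []
--     for _ in range(KEY_SIZE - 1):
--         digits.append(CHARSET[t % CHARSET_SIZE])
--         t //= CHARSET_SIZE
--     return ''.join(reversed(digits))
-- ===== Notes on version B (the rewrite author's own statement) =====
-- stated objective: simpler
-- what changed: Replaces the 5-iteration masked affine loop by its closed form 16807*n+19607 mod 2^64, and builds the 15 base-62 digits least-significant-first by appending and reversing instead of writing into a preallocated slot array by descending index.
import Mathlib
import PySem

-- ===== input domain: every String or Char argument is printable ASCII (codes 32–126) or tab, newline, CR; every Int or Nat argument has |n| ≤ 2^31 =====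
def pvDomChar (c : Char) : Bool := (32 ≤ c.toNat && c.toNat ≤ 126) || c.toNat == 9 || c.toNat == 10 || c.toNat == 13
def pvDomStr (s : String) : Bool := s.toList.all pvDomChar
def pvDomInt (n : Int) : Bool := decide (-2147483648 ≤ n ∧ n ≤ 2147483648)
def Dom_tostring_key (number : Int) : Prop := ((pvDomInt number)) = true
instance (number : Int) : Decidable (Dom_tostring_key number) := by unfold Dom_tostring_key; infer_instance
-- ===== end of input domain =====

-- B replaces the 5-iteration masked affine loop by its closed form 16807*n+19607 mod 2^64 and
-- renders the 15 base-62 digits by append-then-reverse instead of descending-index slot writes (simpler).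

-- ===== PORT A =====
def pvCHARSET : String := "ABCDEFGHIJKLMNOPQRSTUVWXYZabcdefghijklmnopqrstuvwxyz0123456789"

-- Python '&' on ints is PySem.Int.band; '<<' is core Lean's '<<<' with a Nat shift count (Python-exact)
def complex_transform (number : Int) : Int :=
  (List.range 5).foldl
    (fun transformed _ =>
      PySem.Int.band ((transformed <<< (3:Nat)) - transformed + 7) 18446744073709551615)
    number

-- Python 1-char strings are List Char entries; [''] * 15 is replicate 15 []; ''.join is flatten (exact for separator '')
def tostring_key (number : Int) : String :=
  let keyChars : List (List Char) := List.replicate 15 []     -- [''] * (KEY_SIZE - 1)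
  let t := complex_transform number
  let st := (PySem.List.pyRange 14 (-1) (-1)).foldl
    (fun (st : List (List Char) × Int) i =>
      let index := PySem.Int.mod st.2 (PySem.Str.len pvCHARSET)
      (PySem.List.pySetD st.1 i [PySem.List.pyGetD pvCHARSET.toList index ' '],
       PySem.Int.floordiv st.2 (PySem.Str.len pvCHARSET)))
    (keyChars, t)
  String.ofList st.1.flatten

-- ===== PORT B =====
-- Source B's append loop: digits collected least-significant-first, then reversed and joined
def pvAltDigits : Nat → Int → List Char
  | 0, _ => []
  | k+1, t =>
      PySem.List.pyGetD pvCHARSET.toList (PySem.Int.mod t 62) ' '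
        :: pvAltDigits k (PySem.Int.floordiv t 62)

def tostring_key_alt (number : Int) : String :=
  let t := PySem.Int.mod (16807 * number + 19607) 18446744073709551616
  String.ofList (pvAltDigits 15 t).reverse

-- ===== PRECONDITION & SPEC =====
def Spec_tostring_key (number : Int) (out : String) : Prop := out = tostring_key_alt number
instance (number : Int) (out : String) : Decidable (Spec_tostring_key number out) := by unfold Spec_tostring_key; infer_instance

-- ===== CLAIM (what is proved, stated in full; the proofs are below) =====
def Claim_equal_tostring_key : Prop := ∀ (number : Int), Dom_tostring_key number → Spec_tostring_key number (tostring_key number)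

-- ===== LEMMAS AND PROOFS =====

-- Python's x & (2^64 - 1) is x mod 2^64 for every x ≥ -2^64
theorem pv_band_mask (x : Int) (hx : -18446744073709551616 ≤ x) :
    PySem.Int.band x 18446744073709551615 = x % 18446744073709551616 := by
  unfold PySem.Int.band
  have hT : (18446744073709551615:Int).toNat = 18446744073709551615 := rfl
  have h1' : (2:Nat)^64 - 1 = 18446744073709551615 := by norm_num
  have h2' : (2:Nat)^64 = 18446744073709551616 := by norm_num
  split_ifs with h1 h2 h2
  · have hn := Nat.and_two_pow_sub_one_eq_mod x.toNat 64
    rw [h1', h2'] at hn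
    rw [hT, hn]
    omega
  · omega
  · have hn := Nat.and_two_pow_sub_one_eq_mod ((-x-1).toNat) 64
    rw [Nat.and_comm] at hn
    rw [h1', h2'] at hn
    rw [hT, hn]
    omega
  · omega

-- the 5-fold masked affine map collapses to one affine map mod 2^64
theorem pv_transform_closed (n : Int) (hlo : -2147483648 ≤ n) (hhi : n ≤ 2147483648) :
    complex_transform n = PySem.Int.mod (16807 * n + 19607) 18446744073709551616 := by
  have hstep : ∀ x : Int, -2305843009213693952 ≤ x →
      PySem.Int.band ((x <<< (3:Nat)) - x + 7) 18446744073709551615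
        = (7 * x + 7) % 18446744073709551616 := by
    intro x hx
    rw [Int.shiftLeft_eq, show x * 2 ^ 3 - x + 7 = 7 * x + 7 by ring]
    exact pv_band_mask _ (by omega)
  have comp : ∀ y : Int, (7 * (y % 18446744073709551616) + 7) % 18446744073709551616
      = (7 * y + 7) % 18446744073709551616 := by intro y; omega
  have h1 := hstep n (by omega)
  have h2 : PySem.Int.band ((((7*n+7) % 18446744073709551616) <<< (3:Nat))
      - ((7*n+7) % 18446744073709551616) + 7) 18446744073709551615
      = (49*n+56) % 18446744073709551616 := by
    rw [hstep _ (by omega), comp, show 7*(7*n+7)+7 = 49*n+56 from by ring]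
  have comp2 : ∀ y : Int, (7 * ((49*y+56) % 18446744073709551616) + 7) % 18446744073709551616
      = (343*y+399) % 18446744073709551616 := by intro y; omega
  have h3 : PySem.Int.band ((((49*n+56) % 18446744073709551616) <<< (3:Nat))
      - ((49*n+56) % 18446744073709551616) + 7) 18446744073709551615
      = (343*n+399) % 18446744073709551616 := by
    rw [hstep _ (by omega), comp2]
  have comp3 : ∀ y : Int, (7 * ((343*y+399) % 18446744073709551616) + 7) % 18446744073709551616
      = (2401*y+2800) % 18446744073709551616 := by intro y; omega
  have h4 : PySem.Int.band ((((343*n+399) % 18446744073709551616) <<< (3:Nat))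
      - ((343*n+399) % 18446744073709551616) + 7) 18446744073709551615
      = (2401*n+2800) % 18446744073709551616 := by
    rw [hstep _ (by omega), comp3]
  have comp4 : ∀ y : Int, (7 * ((2401*y+2800) % 18446744073709551616) + 7) % 18446744073709551616
      = (16807*y+19607) % 18446744073709551616 := by intro y; omega
  have h5 : PySem.Int.band ((((2401*n+2800) % 18446744073709551616) <<< (3:Nat))
      - ((2401*n+2800) % 18446744073709551616) + 7) 18446744073709551615
      = (16807*n+19607) % 18446744073709551616 := by
    rw [hstep _ (by omega), comp4]
  simp only [complex_transform, List.range_succ, List.range_zero, List.foldl_append,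
    List.foldl_cons, List.foldl_nil]
  rw [h1, h2, h3, h4, h5, PySem.Int.mod_eq_emod_of_pos (by norm_num)]

-- singleton-chunks flatten back to the list itself (''.join of 1-char strings)
theorem pv_flatten_sing (l : List Char) : (l.map (fun c => [c])).flatten = l := by
  induction l with
  | nil => simp
  | cons a l ih => simp [ih]

-- A's descending-index slot-writing loop yields exactly B's reversed digit list in positions 0..m
theorem pv_loop_inv (m : Nat) : ∀ (t : Int) (L : List (List Char)), m < L.length →
    ((PySem.List.pyRange (m : Int) (-1) (-1)).foldl
      (fun (st : List (List Char) × Int) i =>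
        let index := PySem.Int.mod st.2 62
        (PySem.List.pySetD st.1 i [PySem.List.pyGetD pvCHARSET.toList index ' '],
         PySem.Int.floordiv st.2 62))
      (L, t)).1
    = ((pvAltDigits (m+1) t).reverse.map (fun c => [c])) ++ L.drop (m+1) := by
  induction m with
  | zero =>
    intro t L hL
    rw [show ((0:Nat):Int) = 0 by norm_num,
      PySem.List.pyRange_neg_one_cons (by norm_num),
      show (0:Int) - 1 = -1 by norm_num,
      PySem.List.pyRange_neg_one_eq_nil (le_refl _)]
    simp only [List.foldl_cons, List.foldl_nil]
    rw [show (0:Int) = ((0:Nat):Int) by norm_num]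
    simp only [PySem.List.pySetD_natCast]
    simp [pvAltDigits]
    cases L with
    | nil => simp at hL
    | cons a L' => simp
  | succ m ih =>
    intro t L hL
    rw [PySem.List.pyRange_neg_one_cons (by push_cast; omega),
      show ((m+1:Nat):Int) - 1 = (m:Int) by push_cast; ring]
    simp only [List.foldl_cons]
    simp only [PySem.List.pySetD_natCast]
    rw [ih (PySem.Int.floordiv t 62) _ (by rw [List.length_set]; omega)]
    have hset := List.set_eq_take_cons_drop
      ([PySem.List.pyGetD pvCHARSET.toList (PySem.Int.mod t 62) ' ']) hL
    rw [hset]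
    have htk : (L.take (m+1)).length = m + 1 := by
      simp [List.length_take]; omega
    rw [List.drop_append_of_le_length (by omega),
      List.drop_eq_nil_of_le (by omega)]
    simp [pvAltDigits, List.reverse_cons, List.map_append, List.append_assoc]

-- ===== VERDICT (by name: the statement is the Claim_ definition above) =====
theorem tostring_key_spec : Claim_equal_tostring_key := by
  intro n hdom
  have hb : -2147483648 ≤ n ∧ n ≤ 2147483648 := by
    have := hdom
    unfold Dom_tostring_key pvDomInt at this
    exact of_decide_eq_true this
  unfold Spec_tostring_key tostring_key tostring_key_alt
  have hlen : PySem.Str.len pvCHARSET = 62 := by decide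
  simp only [hlen]
  rw [pv_transform_closed n hb.1 hb.2]
  rw [show (14:Int) = ((14:Nat):Int) by norm_num]
  rw [pv_loop_inv 14 _ (List.replicate 15 []) (by simp)]
  rw [List.drop_eq_nil_of_le (by simp), List.append_nil, pv_flatten_sing]
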